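-- pv_equiv track=rewrite | github.com/chus-chus/teex | _utils.py | _generate_feature_names
-- ===== SOURCE A (Python) =====
-- from string import ascii_letters
--
-- def _generate_feature_names(nFeatures):
--     """ Generates a list of length *nFeatures* with combinatinos of the abecedary. """
--
--     if nFeatures > len(ascii_letters):
--         featureNames = list()
--         name, i, j = 0, 0, -1
--         while name < nFeatures:
--             if j == -1:
--                 fName = ascii_letters[i]
--             else:
--                 fName = featureNames[j] + ascii_letters[i]
--             featureNames.append(fName)
--             i += 1
--             if i % len(ascii_letters) == 0:
--                 j += 1
--                 i = 0
--             name += 1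
--     else:
--         featureNames = [ascii_letters[i] for i in range(nFeatures)]
--     return featureNames
-- ===== SOURCE B (Python) =====
-- from string import ascii_letters
--
-- def _generate_feature_names(nFeatures):
--     """ Generates a list of length *nFeatures* with combinations of the abecedary. """
--
--     def name(n):
--         if n < len(ascii_letters):
--             return ascii_letters[n]
--         q, r = divmod(n - len(ascii_letters), len(ascii_letters))
--         return name(q) + ascii_letters[r]
--
--     return [name(n) for n in range(nFeatures)]
-- ===== Notes on version B (the rewrite author's own statement) =====
-- stated objective: simpler
-- what changed: Replaced A's while-loop state machine (counters name/i/j with a modulo reset and a branch on j == -1) by a recursive name(n) that builds the n-th name directly via divmod(n-52, 52), mapped over range(nFeatures); the size branch disappears.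
import Mathlib
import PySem

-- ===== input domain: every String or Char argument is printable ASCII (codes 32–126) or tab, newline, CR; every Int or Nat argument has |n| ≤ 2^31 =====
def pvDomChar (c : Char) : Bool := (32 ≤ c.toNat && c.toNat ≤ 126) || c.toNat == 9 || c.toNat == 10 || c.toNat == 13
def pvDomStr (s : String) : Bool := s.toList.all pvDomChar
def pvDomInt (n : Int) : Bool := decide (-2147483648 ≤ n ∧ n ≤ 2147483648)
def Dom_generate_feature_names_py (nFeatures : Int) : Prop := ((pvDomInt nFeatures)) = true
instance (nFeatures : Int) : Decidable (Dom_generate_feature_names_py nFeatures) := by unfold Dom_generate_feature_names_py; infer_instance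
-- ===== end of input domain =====

-- B replaces A's while-loop state machine (counters name/i/j with a modulo reset) by a
-- recursive name(n) built from divmod over the index; objective: simpler, same cost.

-- string.ascii_letters (shared module-level constant of both programs)
def pvLetters : List Char := "abcdefghijklmnopqrstuvwxyzABCDEFGHIJKLMNOPQRSTUVWXYZ".toList

-- ascii_letters[i] as a 1-character Python string (index is always in range in both programs)
def pvLetter (i : Int) : String := String.ofList [PySem.List.pyGetD pvLetters i ' ']

-- ===== PORT A =====
-- the 'while name < nFeatures' loop; featureNames[j] is always in range (0 ≤ j < name)
def generate_feature_names_loop (nFeatures : Int) (featureNames : List String)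
    (name i j : Int) : List String :=
  if _h : name < nFeatures then
    let fName := if j = -1 then pvLetter i
                 else PySem.List.pyGetD featureNames j "" ++ pvLetter i
    let featureNames' := featureNames ++ [fName]
    let i' := i + 1
    if PySem.Int.mod i' (pvLetters.length : Int) = 0 then
      generate_feature_names_loop nFeatures featureNames' (name + 1) 0 (j + 1)
    else
      generate_feature_names_loop nFeatures featureNames' (name + 1) i' j
  else featureNames
termination_by (nFeatures - name).toNat
decreasing_by all_goals omega

def generate_feature_names_py (nFeatures : Int) : List String :=
  if nFeatures > (pvLetters.length : Int) then
    generate_feature_names_loop nFeatures [] 0 0 (-1)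
  else
    (PySem.List.pyRange 0 nFeatures 1).map (fun i => pvLetter i)

-- ===== PORT B =====
-- name(n): ascii_letters[n] for n < 52, else name(q) + ascii_letters[r] with q, r = divmod(n-52, 52)
def pvAltName (n : Int) : String :=
  if h : n < (pvLetters.length : Int) then pvLetter n
  else
    pvAltName (PySem.Int.floordiv (n - (pvLetters.length : Int)) (pvLetters.length : Int))
      ++ pvLetter (PySem.Int.mod (n - (pvLetters.length : Int)) (pvLetters.length : Int))
termination_by n.toNat
decreasing_by
  have hl : ((pvLetters.length : Int)) = 52 := by decide
  simp only [hl] at h ⊢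
  rw [PySem.Int.floordiv_eq_ediv_of_pos (by norm_num)]
  have h1 : 0 ≤ (n - 52) / 52 := Int.ediv_nonneg (by omega) (by omega)
  have h2 : (n - 52) / 52 ≤ n - 52 := Int.ediv_le_self _ (by omega)
  omega

def generate_feature_names_py_alt (nFeatures : Int) : List String :=
  (PySem.List.pyRange 0 nFeatures 1).map pvAltName

-- ===== PRECONDITION & SPEC =====
def Spec_generate_feature_names_py (nFeatures : Int) (out : List String) : Prop := out = generate_feature_names_py_alt nFeatures
instance (nFeatures : Int) (out : List String) : Decidable (Spec_generate_feature_names_py nFeatures out) := by unfold Spec_generate_feature_names_py; infer_instance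

-- ===== CLAIM (what is proved, stated in full; the proofs are below) =====
def Claim_equal_generate_feature_names_py : Prop := ∀ (nFeatures : Int), Dom_generate_feature_names_py nFeatures → Spec_generate_feature_names_py nFeatures (generate_feature_names_py nFeatures)

-- ===== LEMMAS AND PROOFS =====

lemma pvLen52 : ((pvLetters.length : Int)) = 52 := by decide

lemma pvAltName_small {n : Int} (h : n < 52) : pvAltName n = pvLetter n := by
  have hl := pvLen52
  rw [pvAltName, dif_pos (by omega)]

lemma pvAltName_large {n : Int} (h : ¬ n < 52) :
    pvAltName n = pvAltName (PySem.Int.floordiv (n - 52) 52)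
      ++ pvLetter (PySem.Int.mod (n - 52) 52) := by
  have hl := pvLen52
  rw [pvAltName, dif_neg (by omega)]
  rw [hl]

-- indexing the already-built prefix: featureNames[j] = pvAltName j
lemma pvGetD_map_range (f : Int → String) (k j : Nat) (h : j < k) :
    PySem.List.pyGetD ((List.range k).map (fun m : Nat => f (m : Int))) (j : Int) "" = f (j : Int) := by
  rw [PySem.List.pyGetD_natCast, PySem.List.getD_map_range _ k j _ h]

-- the loop invariant: after k iterations featureNames = map pvAltName [0, k),
-- name = k, i = k % 52, j = k / 52 - 1
lemma loop_inv (nF : Int) : ∀ (d k : Nat), (k : Int) ≤ nF → (nF - k).toNat = d →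
    generate_feature_names_loop nF ((List.range k).map (fun m : Nat => pvAltName (m : Int)))
      k (PySem.Int.mod k 52) (PySem.Int.floordiv k 52 - 1)
      = (List.range nF.toNat).map (fun m : Nat => pvAltName (m : Int)) := by
  intro d
  induction d with
  | zero =>
    intro k hk hd
    have hEq : (k : Int) = nF := by omega
    rw [generate_feature_names_loop, dif_neg (by omega)]
    have : nF.toNat = k := by omega
    rw [this]
  | succ d ih =>
    intro k hk hd
    have hlt : (k : Int) < nF := by omega
    have hmod : PySem.Int.mod (k : Int) 52 = (k : Int) % 52 :=
      PySem.Int.mod_eq_emod_of_pos (by norm_num)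
    have hdiv : PySem.Int.floordiv (k : Int) 52 = (k : Int) / 52 :=
      PySem.Int.floordiv_eq_ediv_of_pos (by norm_num)
    rw [generate_feature_names_loop, dif_pos hlt]
    simp only [pvLen52]
    have hfName :
        (if PySem.Int.floordiv (k : Int) 52 - 1 = -1 then pvLetter (PySem.Int.mod k 52)
         else PySem.List.pyGetD ((List.range k).map (fun m : Nat => pvAltName (m : Int)))
                (PySem.Int.floordiv (k : Int) 52 - 1) ""
              ++ pvLetter (PySem.Int.mod k 52)) = pvAltName (k : Int) := by
      by_cases hsmall : (k : Int) < 52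
      · rw [if_pos (by rw [hdiv]; omega), pvAltName_small hsmall, hmod]
        congr 1
        omega
      · rw [if_neg (by rw [hdiv]; omega), pvAltName_large hsmall]
        have hj : PySem.Int.floordiv (k : Int) 52 - 1 = ((k / 52 - 1 : Nat) : Int) := by
          rw [hdiv]; omega
        rw [hj, pvGetD_map_range _ k _ (by omega)]
        have hq : PySem.Int.floordiv ((k : Int) - 52) 52 = ((k / 52 - 1 : Nat) : Int) := by
          rw [PySem.Int.floordiv_eq_ediv_of_pos (by norm_num)]; omega
        have hr : PySem.Int.mod ((k : Int) - 52) 52 = PySem.Int.mod (k : Int) 52 := by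
          rw [PySem.Int.mod_eq_emod_of_pos (by norm_num), hmod]; omega
        rw [hq, hr]
    rw [hfName]
    have hsnoc : (List.range k).map (fun m : Nat => pvAltName (m : Int)) ++ [pvAltName (k : Int)]
        = (List.range (k + 1)).map (fun m : Nat => pvAltName (m : Int)) := by
      rw [List.range_succ, List.map_append]; rfl
    by_cases hwrap : PySem.Int.mod (PySem.Int.mod (k : Int) 52 + 1) 52 = 0
    · have hwrap' : (k : Int) % 52 = 51 := by
        rw [PySem.Int.mod_eq_emod_of_pos (by norm_num), hmod] at hwrap
        omega
      rw [if_pos hwrap, hsnoc]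
      have e1 : ((k : Int) + 1) = ((k + 1 : Nat) : Int) := by omega
      have e2 : (0 : Int) = PySem.Int.mod ((k + 1 : Nat) : Int) 52 := by
        simp only [PySem.Int.mod_eq_emod_of_pos (by norm_num : (0:Int) < 52)]; omega
      have e3 : PySem.Int.floordiv (k : Int) 52 - 1 + 1
          = PySem.Int.floordiv ((k + 1 : Nat) : Int) 52 - 1 := by
        rw [hdiv, PySem.Int.floordiv_eq_ediv_of_pos (by norm_num)]; omega
      rw [e1, e2, e3]
      exact ih (k + 1) (by omega) (by omega)
    · have hwrap' : (k : Int) % 52 ≠ 51 := by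
        rw [PySem.Int.mod_eq_emod_of_pos (by norm_num), hmod] at hwrap
        omega
      rw [if_neg hwrap, hsnoc]
      have e1 : ((k : Int) + 1) = ((k + 1 : Nat) : Int) := by omega
      have e2 : PySem.Int.mod (k : Int) 52 + 1 = PySem.Int.mod ((k + 1 : Nat) : Int) 52 := by
        simp only [PySem.Int.mod_eq_emod_of_pos (by norm_num : (0:Int) < 52)]; omega
      have e3 : PySem.Int.floordiv (k : Int) 52 - 1
          = PySem.Int.floordiv ((k + 1 : Nat) : Int) 52 - 1 := by
        rw [hdiv, PySem.Int.floordiv_eq_ediv_of_pos (by norm_num)]; omega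
      rw [e1, e2, e3]
      exact ih (k + 1) (by omega) (by omega)

lemma alt_eq_map_range (nF : Int) :
    generate_feature_names_py_alt nF = (List.range nF.toNat).map (fun m : Nat => pvAltName (m : Int)) := by
  rw [generate_feature_names_py_alt, PySem.List.pyRange_one]
  rw [List.map_map]
  simp [Function.comp_def]

-- ===== VERDICT (by name: the statement is the Claim_ definition above) =====
theorem generate_feature_names_py_spec : Claim_equal_generate_feature_names_py := by
  intro nF _
  unfold Spec_generate_feature_names_py generate_feature_names_py
  by_cases h : nF > (pvLetters.length : Int)
  · rw [if_pos h, alt_eq_map_range]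
    have h0 := loop_inv nF (nF - 0).toNat 0 (by omega) rfl
    have em : PySem.Int.mod (0 : Int) 52 = 0 := by decide
    have ed : PySem.Int.floordiv (0 : Int) 52 - 1 = -1 := by decide
    simp only [List.range_zero, List.map_nil, Nat.cast_zero, em, ed] at h0
    exact h0
  · rw [if_neg h, generate_feature_names_py_alt]
    apply List.map_congr_left
    intro x hx
    rw [PySem.List.mem_pyRange_one] at hx
    have hl := pvLen52
    exact (pvAltName_small (by omega)).symm
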